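-- pv_equiv track=rewrite | github.com/dh7hong/algorithms-level-4 | 2025-01-23/91_skill-dev.py | solution
-- ===== SOURCE A (Python) =====
-- def solution(progresses, speeds):
--     # Step 1: Compute the number of days each feature needs to reach 100%
--     days_required = []
--     # List to store days needed for each feature
--
--     for i in range(len(progresses)):
--         remaining_work = 100 - progresses[i]
--         # Work left to complete
--         days = (remaining_work + speeds[i] - 1) // speeds[i]
--         # Ceiling division
--         days_required.append(days)
--         # Store the computed days
--
--     # Step 2: Process the deployment in order
--     deploy_batches = []
--     # Stores the number of features deployed together
--     first_deploy_day = days_required[0]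
--     # The first feature's deployment day
--     count = 0
--     # Count features in a batch
--
--     for days in days_required:
--         if days > first_deploy_day:
--             # A new batch starts when a feature
--             # takes longer than the current batch
--             deploy_batches.append(count)
--             count = 1
--             # Start new batch count
--             first_deploy_day = days
--             # Update the first deployable day
--         else:
--             count += 1  # Add to the current batch
--
--     # Add the last batch count
--     deploy_batches.append(count)
--
--     return deploy_batches
-- ===== SOURCE B (Python) =====
-- def solution(progresses, speeds):
--     days = [(100 - progresses[i] + speeds[i] - 1) // speeds[i]
--             for i in range(len(progresses))]
--     # prefix-maximum table: running_max[i] = max(days[0..i])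
--     peak = days[0]
--     running_max = []
--     for d in days:
--         if d > peak:
--             peak = d
--         running_max.append(peak)
--     # batch sizes = multiplicity of each distinct running-max value, in first-occurrence order
--     return [running_max.count(m) for m in dict.fromkeys(running_max)]
-- ===== Notes on version B (the rewrite author's own statement) =====
-- stated objective: alternative
-- what changed: B replaces A's single threshold-and-counter batching pass by staged table passes: it materialises the prefix-maximum table of the days list and returns the multiplicity of each distinct prefix-max value (first-occurrence order), so no batch counter or running threshold is kept.
import Mathlib
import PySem

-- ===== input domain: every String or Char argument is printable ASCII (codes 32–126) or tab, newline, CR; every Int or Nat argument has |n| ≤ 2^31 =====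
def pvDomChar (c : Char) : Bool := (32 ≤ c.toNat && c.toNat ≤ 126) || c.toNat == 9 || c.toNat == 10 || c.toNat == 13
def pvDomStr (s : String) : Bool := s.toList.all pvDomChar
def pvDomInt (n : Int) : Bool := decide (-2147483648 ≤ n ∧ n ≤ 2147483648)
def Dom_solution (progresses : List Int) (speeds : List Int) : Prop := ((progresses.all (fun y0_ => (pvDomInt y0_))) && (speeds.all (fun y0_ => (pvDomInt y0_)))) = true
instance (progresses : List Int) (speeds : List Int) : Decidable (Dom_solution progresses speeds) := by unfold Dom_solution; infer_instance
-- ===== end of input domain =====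

-- B derives the batch sizes from the prefix-maximum table of the days list (multiplicity of each
-- distinct prefix-max value, in first-occurrence order) instead of A's threshold-and-counter pass; objective: alternative.

-- ===== PORT A =====
def solution (progresses : List Int) (speeds : List Int) : List Int :=
  -- Step 1: for i in range(len(progresses)): append ceiling-division days
  let days_required := (PySem.List.pyRange 0 progresses.length 1).foldl
    (fun acc i =>
      let remaining_work := 100 - PySem.List.pyGetD progresses i 0
      acc ++ [PySem.Int.floordiv (remaining_work + PySem.List.pyGetD speeds i 0 - 1)
                (PySem.List.pyGetD speeds i 0)]) []
  -- Step 2: first_deploy_day = days_required[0] (Pre_ excludes the empty case where Python raises)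
  let first_deploy_day := PySem.List.pyGetD days_required 0 0
  -- for days in days_required: running (deploy_batches, first_deploy_day, count)
  let st := days_required.foldl
    (fun (st : List Int × Int × Int) (days : Int) =>
      if days > st.2.1 then (st.1 ++ [st.2.2], days, 1) else (st.1, st.2.1, st.2.2 + 1))
    ([], first_deploy_day, 0)
  st.1 ++ [st.2.2]

-- ===== PORT B =====
def solution_alt (progresses : List Int) (speeds : List Int) : List Int :=
  -- days = [(100 - progresses[i] + speeds[i] - 1) // speeds[i] for i in range(len(progresses))]
  let days := (PySem.List.pyRange 0 progresses.length 1).map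
    (fun i => PySem.Int.floordiv
      (100 - PySem.List.pyGetD progresses i 0 + PySem.List.pyGetD speeds i 0 - 1)
      (PySem.List.pyGetD speeds i 0))
  -- peak = days[0] (Pre_ excludes the empty case where Python raises)
  -- for d in days: if d > peak: peak = d; running_max.append(peak)
  let st := days.foldl
    (fun (st : Int × List Int) (d : Int) =>
      let peak := if d > st.1 then d else st.1
      (peak, st.2 ++ [peak]))
    (PySem.List.pyGetD days 0 0, [])
  let running_max := st.2
  -- [running_max.count(m) for m in dict.fromkeys(running_max)]
  (PySem.List.dedup running_max).map (fun m => ((PySem.List.count running_max m : Nat) : Int))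

-- ===== PRECONDITION & SPEC =====
-- Pre_ excludes exactly the inputs where Python A raises: empty progresses (IndexError on
-- days_required[0]), speeds shorter than progresses (IndexError), or a zero speed used
-- (ZeroDivisionError). A returns on every other input.
def Pre_solution (progresses : List Int) (speeds : List Int) : Prop :=
  progresses ≠ [] ∧ progresses.length ≤ speeds.length ∧
    ∀ x ∈ speeds.take progresses.length, x ≠ 0
instance (progresses : List Int) (speeds : List Int) : Decidable (Pre_solution progresses speeds) := by
  unfold Pre_solution; infer_instance

def pvWitness_solution : List Int × List Int := ([93, 30, 55], [1, 30, 5])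

def Spec_solution (progresses : List Int) (speeds : List Int) (out : List Int) : Prop := out = solution_alt progresses speeds
instance (progresses : List Int) (speeds : List Int) (out : List Int) : Decidable (Spec_solution progresses speeds out) := by unfold Spec_solution; infer_instance

-- ===== CLAIM (what is proved, stated in full; the proofs are below) =====
def Claim_equal_solution : Prop := ∀ (progresses : List Int) (speeds : List Int), Dom_solution progresses speeds → Pre_solution progresses speeds → Spec_solution progresses speeds (solution progresses speeds)

-- ===== LEMMAS AND PROOFS =====

-- canonical chunk decomposition: both programs' result equals this (fuel ≥ length suffices)
def pvChunksF : Nat → List Int → List Int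
  | _, [] => []
  | 0, _ :: _ => []
  | fuel + 1, d :: rest =>
      (1 + ((rest.takeWhile (fun x => decide (x ≤ d))).length : Int))
        :: pvChunksF fuel (rest.dropWhile (fun x => decide (x ≤ d)))

def pvChunks (l : List Int) : List Int := pvChunksF l.length l

theorem pvChunksF_congr : ∀ (f1 f2 : Nat) (l : List Int),
    l.length ≤ f1 → l.length ≤ f2 → pvChunksF f1 l = pvChunksF f2 l := by
  intro f1
  induction f1 with
  | zero =>
      intro f2 l h1 _
      match l, h1 with
      | [], _ => cases f2 <;> rfl
  | succ f1 ih =>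
      intro f2 l h1 h2
      match l with
      | [] => cases f2 <;> rfl
      | d :: rest =>
          match f2 with
          | 0 => simp at h2
          | f2 + 1 =>
              simp only [pvChunksF]
              congr 1
              apply ih
              · exact le_trans (List.length_dropWhile_le _ rest) (by simpa using h1)
              · exact le_trans (List.length_dropWhile_le _ rest) (by simpa using h2)

theorem pvChunks_nil : pvChunks [] = [] := rfl

theorem pvChunks_cons (d : Int) (rest : List Int) :
    pvChunks (d :: rest)
      = (1 + ((rest.takeWhile (fun x => decide (x ≤ d))).length : Int))
          :: pvChunks (rest.dropWhile (fun x => decide (x ≤ d))) := by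
  unfold pvChunks
  rw [List.length_cons, pvChunksF]
  congr 1
  exact pvChunksF_congr _ _ _ (List.length_dropWhile_le _ rest) le_rfl

-- ---------- A side ----------

-- the fold's accumulator list is only appended to
theorem pvFoldA_acc (ds : List Int) : ∀ (b : List Int) (f c : Int),
    List.foldl
      (fun (st : List Int × Int × Int) (days : Int) =>
        if days > st.2.1 then (st.1 ++ [st.2.2], days, 1) else (st.1, st.2.1, st.2.2 + 1))
      (b, f, c) ds
    = (b ++ (List.foldl
        (fun (st : List Int × Int × Int) (days : Int) =>
          if days > st.2.1 then (st.1 ++ [st.2.2], days, 1) else (st.1, st.2.1, st.2.2 + 1))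
        ([], f, c) ds).1,
       (List.foldl
        (fun (st : List Int × Int × Int) (days : Int) =>
          if days > st.2.1 then (st.1 ++ [st.2.2], days, 1) else (st.1, st.2.1, st.2.2 + 1))
        ([], f, c) ds).2) := by
  induction ds with
  | nil => intro b f c; simp
  | cons d ds ih =>
      intro b f c
      by_cases h : d > f
      · simp only [List.foldl_cons, if_pos h, List.nil_append]
        rw [ih (b ++ [c]) d 1, ih [c] d 1]
        simp
      · simp only [List.foldl_cons, if_neg h]
        exact ih b f (c + 1)

-- the fold realises the chunk decomposition
theorem pvFoldA_chunks (ds : List Int) : ∀ (f c : Int),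
    (List.foldl
      (fun (st : List Int × Int × Int) (days : Int) =>
        if days > st.2.1 then (st.1 ++ [st.2.2], days, 1) else (st.1, st.2.1, st.2.2 + 1))
      ([], f, c) ds).1
    ++ [(List.foldl
      (fun (st : List Int × Int × Int) (days : Int) =>
        if days > st.2.1 then (st.1 ++ [st.2.2], days, 1) else (st.1, st.2.1, st.2.2 + 1))
      ([], f, c) ds).2.2]
    = (c + ((ds.takeWhile (fun x => decide (x ≤ f))).length : Int))
        :: pvChunks (ds.dropWhile (fun x => decide (x ≤ f))) := by
  induction ds with
  | nil => intro f c; simp [pvChunks_nil]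
  | cons d ds ih =>
      intro f c
      by_cases h : d > f
      · have hd : ¬ (fun x => decide (x ≤ f)) d = true := by
          simp only [decide_eq_true_eq]; omega
        simp only [List.foldl_cons, if_pos h, List.nil_append]
        rw [pvFoldA_acc ds [c] d 1]
        rw [List.takeWhile_cons_of_neg (p := fun x => decide (x ≤ f)) hd,
          List.dropWhile_cons_of_neg (p := fun x => decide (x ≤ f)) hd]
        simp only [List.length_nil, Nat.cast_zero, add_zero]
        rw [List.append_assoc, List.singleton_append, ih d 1, pvChunks_cons]
      · have hd : (fun x => decide (x ≤ f)) d = true := by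
          simp only [decide_eq_true_eq]; omega
        simp only [List.foldl_cons, if_neg h]
        rw [List.takeWhile_cons_of_pos (p := fun x => decide (x ≤ f)) hd,
          List.dropWhile_cons_of_pos (p := fun x => decide (x ≤ f)) hd,
          ih f (c + 1), List.length_cons]
        push_cast
        ring_nf

-- packaged: A's whole batching phase equals pvChunks on a nonempty days list
theorem pvA_chunks (ds : List Int) (hne : ds ≠ []) :
    (List.foldl
      (fun (st : List Int × Int × Int) (days : Int) =>
        if days > st.2.1 then (st.1 ++ [st.2.2], days, 1) else (st.1, st.2.1, st.2.2 + 1))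
      ([], PySem.List.pyGetD ds 0 0, 0) ds).1
    ++ [(List.foldl
      (fun (st : List Int × Int × Int) (days : Int) =>
        if days > st.2.1 then (st.1 ++ [st.2.2], days, 1) else (st.1, st.2.1, st.2.2 + 1))
      ([], PySem.List.pyGetD ds 0 0, 0) ds).2.2]
    = pvChunks ds := by
  obtain ⟨d0, rest, rfl⟩ := List.exists_cons_of_ne_nil hne
  have hget0 : PySem.List.pyGetD (d0 :: rest) (0 : Int) 0 = d0 := by
    rw [PySem.List.pyGetD_ofNat']; rfl
  have hd : (fun x => decide (x ≤ d0)) d0 = true := by simp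
  rw [hget0, pvFoldA_chunks, pvChunks_cons,
    List.takeWhile_cons_of_pos (p := fun x => decide (x ≤ d0)) hd,
    List.dropWhile_cons_of_pos (p := fun x => decide (x ≤ d0)) hd, List.length_cons]
  push_cast
  ring_nf

-- ---------- B side ----------

-- the prefix-maximum sequence with seed p (the peak carried by B's loop)
def pvPm (p : Int) : List Int → List Int
  | [] => []
  | x :: xs => (if x > p then x else p) :: pvPm (if x > p then x else p) xs

-- B's fold produces acc ++ pvPm p ds in its second component
theorem pvFoldB_pm (ds : List Int) : ∀ (p : Int) (acc : List Int),
    (List.foldl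
      (fun (st : Int × List Int) (d : Int) =>
        let peak := if d > st.1 then d else st.1
        (peak, st.2 ++ [peak])) (p, acc) ds).2 = acc ++ pvPm p ds := by
  induction ds with
  | nil => intro p acc; simp [pvPm]
  | cons d ds ih =>
      intro p acc
      simp only [List.foldl_cons, pvPm]
      rw [ih]
      simp

theorem pvPm_ge (ds : List Int) : ∀ (p : Int), ∀ y ∈ pvPm p ds, p ≤ y := by
  induction ds with
  | nil => intro p y hy; simp [pvPm] at hy
  | cons d ds ih =>
      intro p y hy
      simp only [pvPm, List.mem_cons] at hy
      rcases hy with rfl | hy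
      · split_ifs <;> omega
      · have := ih (if d > p then d else p) y hy
        split_ifs at this <;> omega

-- while elements stay ≤ p the prefix max stays p
theorem pvPm_split (ds : List Int) (p : Int) :
    pvPm p ds = List.replicate (ds.takeWhile (fun x => decide (x ≤ p))).length p
      ++ pvPm p (ds.dropWhile (fun x => decide (x ≤ p))) := by
  induction ds with
  | nil => simp
  | cons d ds ih =>
      by_cases h : d ≤ p
      · have hd : (fun x => decide (x ≤ p)) d = true := by simpa using h
        rw [List.takeWhile_cons_of_pos (p := fun x => decide (x ≤ p)) hd,
          List.dropWhile_cons_of_pos (p := fun x => decide (x ≤ p)) hd]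
        have hif : (if d > p then d else p) = p := by split_ifs <;> omega
        simp only [pvPm, hif, List.length_cons, List.replicate_succ, List.cons_append]
        rw [ih]
      · have hd : ¬ (fun x => decide (x ≤ p)) d = true := by simpa using h
        rw [List.takeWhile_cons_of_neg (p := fun x => decide (x ≤ p)) hd,
          List.dropWhile_cons_of_neg (p := fun x => decide (x ≤ p)) hd]
        simp

-- the running-max table of a list (peak seeded with the head, folded over the whole list)
def pvRun : List Int → List Int
  | [] => []
  | d :: rest => d :: pvPm d rest

-- B's final comprehension
def pvCnt (run : List Int) : List Int :=
  (PySem.List.dedup run).map (fun m => ((PySem.List.count run m : Nat) : Int))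

-- dedup: folding a list that avoids d over a set already containing d just threads d in front
theorem pvFoldAdd_cons (l : List Int) : ∀ (d : Int) (acc : List Int), d ∉ l →
    List.foldl PySem.Set.add (d :: acc) l = d :: List.foldl PySem.Set.add acc l := by
  induction l with
  | nil => intro d acc _; rfl
  | cons x l ih =>
      intro d acc hd
      have hxd : x ≠ d := fun h => hd (h ▸ List.mem_cons_self ..)
      have hd' : d ∉ l := fun h => hd (List.mem_cons_of_mem _ h)
      have hc2 : PySem.Set.contains (d :: acc) x = PySem.Set.contains acc x := by
        simp [PySem.Set.contains, hxd]
      simp only [List.foldl_cons, PySem.Set.add, hc2]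
      by_cases hc : PySem.Set.contains acc x = true
      · rw [if_pos hc, if_pos hc]
        exact ih d acc hd'
      · rw [if_neg hc, if_neg hc,
          show d :: acc ++ [x] = d :: (acc ++ [x]) from rfl]
        exact ih d (acc ++ [x]) hd' 

-- folding replicate d over a set containing d does nothing
theorem pvFoldAdd_replicate (k : Nat) (d : Int) (acc : List Int)
    (h : PySem.Set.contains acc d = true) :
    List.foldl PySem.Set.add acc (List.replicate k d) = acc := by
  induction k with
  | zero => rfl
  | succ k ih =>
      simp only [List.replicate_succ, List.foldl_cons, PySem.Set.add, if_pos h]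
      exact ih

theorem pvDedup_replicate_append (k : Nat) (d : Int) (l : List Int) (hk : 0 < k) (hd : d ∉ l) :
    PySem.List.dedup (List.replicate k d ++ l) = d :: PySem.List.dedup l := by
  obtain ⟨k', rfl⟩ : ∃ k', k = k' + 1 := ⟨k - 1, by omega⟩
  simp only [PySem.List.dedup, PySem.Set.ofList, List.foldl_append]
  have h1 : List.foldl PySem.Set.add PySem.Set.empty (List.replicate (k' + 1) d) = [d] := by
    simp only [List.replicate_succ, List.foldl_cons]
    have : PySem.Set.add PySem.Set.empty d = [d] := rfl
    rw [this]
    exact pvFoldAdd_replicate k' d [d] (by simp [PySem.Set.contains])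
  rw [h1]
  exact pvFoldAdd_cons l d [] hd

-- counting step of B on a block followed by strictly larger values
theorem pvCnt_block (k : Nat) (d : Int) (l : List Int) (hk : 0 < k)
    (hgt : ∀ y ∈ l, d < y) :
    pvCnt (List.replicate k d ++ l) = ((k : Nat) : Int) :: pvCnt l := by
  have hd : d ∉ l := fun h => absurd (hgt d h) (by omega)
  unfold pvCnt
  rw [pvDedup_replicate_append k d l hk hd]
  simp only [List.map_cons]
  congr 1
  · -- head: count of d
    simp only [PySem.List.count, List.count_append, List.count_replicate]
    have : List.count d l = 0 := List.count_eq_zero.mpr hd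
    simp [this]
  · -- tail: counts of the other distinct values are unaffected by the block
    apply List.map_congr_left
    intro m hm
    have hml : m ∈ l := (PySem.List.mem_dedup l m).mp hm
    have hmd : m ≠ d := fun h => absurd (hgt m hml) (by omega)
    have hdm : (d == m) = false := by simpa using (Ne.symm hmd)
    simp only [PySem.List.count, List.count_append, List.count_replicate, hdm]
    simp

-- main B-side lemma: counting multiplicities in the running-max table = chunk decomposition
theorem pvCnt_run_chunks : ∀ (fuel : Nat) (ds : List Int), ds.length ≤ fuel →
    pvCnt (pvRun ds) = pvChunks ds := by
  intro fuel
  induction fuel with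
  | zero =>
      intro ds h
      match ds, h with
      | [], _ => rfl
  | succ fuel ih =>
      intro ds h
      match ds with
      | [] => rfl
      | d :: rest =>
          set t := rest.takeWhile (fun x => decide (x ≤ d)) with ht
          set r := rest.dropWhile (fun x => decide (x ≤ d)) with hr
          have hrun : pvRun (d :: rest) = List.replicate (t.length + 1) d ++ pvPm d r := by
            simp only [pvRun]
            rw [pvPm_split rest d, ← ht, ← hr, List.replicate_succ, List.cons_append]
          have hpmr : pvPm d r = pvRun r ∧ ∀ y ∈ pvRun r, d < y := by
            match hr' : r with
            | [] => exact ⟨rfl, by simp [pvRun]⟩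
            | h0 :: r' =>
                have hh0 : ¬ ((fun x => decide (x ≤ d)) h0 = true) := by
                  have := List.head_dropWhile_not (p := fun x => decide (x ≤ d)) (l := rest)
                    (w := by rw [← hr]; simp)
                  simpa [← hr] using this
                have hdh0 : d < h0 := by simpa using hh0
                have hif : (if h0 > d then h0 else d) = h0 := by split_ifs <;> omega
                constructor
                · simp only [pvPm, hif, pvRun]
                · intro y hy
                  simp only [pvRun, List.mem_cons] at hy
                  rcases hy with rfl | hy
                  · exact hdh0
                  · have := pvPm_ge r' h0 y hy; omega
          rw [hrun, hpmr.1, pvCnt_block (t.length + 1) d (pvRun r) (by omega) hpmr.2]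
          have hlr : r.length ≤ fuel := by
            have h1 : r.length ≤ rest.length := by rw [hr]; exact List.length_dropWhile_le _ rest
            have h2 : rest.length + 1 ≤ fuel + 1 := by simpa using h
            omega
          rw [ih r hlr, pvChunks_cons, ← ht, ← hr]
          congr 1
          push_cast
          ring

-- B's whole pipeline after the days list: fold → running-max table → counts
theorem pvB_chunks (ds : List Int) (hne : ds ≠ []) :
    (PySem.List.dedup
      (List.foldl
        (fun (st : Int × List Int) (d : Int) =>
          let peak := if d > st.1 then d else st.1
          (peak, st.2 ++ [peak])) (PySem.List.pyGetD ds 0 0, []) ds).2).map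
      (fun m => ((PySem.List.count
        (List.foldl
          (fun (st : Int × List Int) (d : Int) =>
            let peak := if d > st.1 then d else st.1
            (peak, st.2 ++ [peak])) (PySem.List.pyGetD ds 0 0, []) ds).2 m : Nat) : Int))
    = pvChunks ds := by
  obtain ⟨d0, rest, rfl⟩ := List.exists_cons_of_ne_nil hne
  have hget0 : PySem.List.pyGetD (d0 :: rest) (0 : Int) 0 = d0 := by
    rw [PySem.List.pyGetD_ofNat']; rfl
  have hrun : (List.foldl
      (fun (st : Int × List Int) (d : Int) =>
        let peak := if d > st.1 then d else st.1
        (peak, st.2 ++ [peak])) (PySem.List.pyGetD (d0 :: rest) 0 0, []) (d0 :: rest)).2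
      = pvRun (d0 :: rest) := by
    rw [hget0, pvFoldB_pm, List.nil_append]
    simp only [pvPm, pvRun, gt_iff_lt, lt_irrefl, if_false]
  rw [hrun]
  exact pvCnt_run_chunks (d0 :: rest).length (d0 :: rest) le_rfl

theorem pv_main (progresses speeds : List Int) (hne : progresses ≠ []) :
    solution progresses speeds = solution_alt progresses speeds := by
  unfold solution solution_alt
  simp only [PySem.List.foldl_append_singleton_eq_map, List.nil_append]
  have hdne : ((PySem.List.pyRange 0 progresses.length 1).map
      (fun i => PySem.Int.floordiv
        (100 - PySem.List.pyGetD progresses i 0 + PySem.List.pyGetD speeds i 0 - 1)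
        (PySem.List.pyGetD speeds i 0))) ≠ [] := by
    have h1 : progresses.length ≠ 0 := fun h => hne (List.eq_nil_of_length_eq_zero h)
    intro hnil
    have h2 := congrArg List.length hnil
    rw [List.length_map, PySem.List.length_pyRange_one, List.length_nil, Int.sub_zero,
      Int.toNat_natCast] at h2
    exact h1 h2
  rw [pvA_chunks _ hdne, pvB_chunks _ hdne]

-- ===== VERDICT (by name: the statement is the Claim_ definition above) =====
theorem solution_spec : Claim_equal_solution := by
  intro progresses speeds _hdom hpre
  unfold Spec_solution
  exact pv_main progresses speeds hpre.1
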